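-- pv_equiv track=rewrite | github.com/SethChloe/improved-train | mypython/dtsettings_st/dtsettings.py | link
-- ===== SOURCE A (Python) =====
-- def link(x, sign):
--     x = list(map(lambda i: sorted(i.split(sign)), x))
--     l = len(x[0])
--     r = []
--     for i in range(len(x)):
--         for j in range(i, len(x)):
--             if x[i][:l - 1] == x[j][:l - 1] and x[i][l - 1] != x[j][l - 1]:
--                 r.append(x[i][:l - 1] + sorted([x[j][l - 1], x[i][l - 1]]))
--     return r
-- ===== SOURCE B (Python) =====
-- def link(x, sign):
--     rows = [sorted(s.split(sign)) for s in x]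
--     l = len(rows[0])
--     groups = {}
--     members = []
--     for row in rows:
--         prefix = row[:l - 1]
--         key = tuple(prefix)
--         g = groups.get(key, [])
--         members.append((prefix, len(g), row[l - 1]))
--         groups[key] = g + [row[l - 1]]
--     r = []
--     for prefix, pos, last in members:
--         for other in groups[tuple(prefix)][pos + 1:]:
--             if other != last:
--                 r.append(prefix + sorted([other, last]))
--     return r
-- ===== Notes on version B (the rewrite author's own statement) =====
-- stated objective: alternative
-- what changed: B builds a dict grouping rows by their sorted-token prefix in one pass and pairs each row only with the later rows of its own group, instead of A's all-pairs nested scan comparing prefixes; intended as faster when prefixes spread rows over many groups, but a timing run did not confirm a speed-up on the generated (single-group) inputs.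
import Mathlib
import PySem

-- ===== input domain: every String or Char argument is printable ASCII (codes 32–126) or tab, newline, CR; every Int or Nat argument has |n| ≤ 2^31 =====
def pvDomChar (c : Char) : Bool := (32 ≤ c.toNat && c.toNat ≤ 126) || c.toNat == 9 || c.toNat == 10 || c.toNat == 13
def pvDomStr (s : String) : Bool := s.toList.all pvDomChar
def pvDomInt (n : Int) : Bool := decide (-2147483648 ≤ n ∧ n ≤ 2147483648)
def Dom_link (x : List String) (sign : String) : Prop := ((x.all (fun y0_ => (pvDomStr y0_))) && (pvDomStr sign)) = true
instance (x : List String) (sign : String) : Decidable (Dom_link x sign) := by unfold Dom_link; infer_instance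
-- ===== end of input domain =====

-- B replaces A's all-pairs scan by grouping the rows once in a dict keyed on the sorted-token
-- prefix and pairing each row only with the later rows of its own group (objective:
-- alternative algorithm; it avoids cross-group comparisons, though a timing run did not
-- confirm a speed-up on its generated inputs).

-- shared by both ports: both Pythons start with exactly 'sorted(s.split(sign)) for s in x'
def pvRows (x : List String) (sign : String) : List (List String) :=
  x.map (fun s => PySem.List.sorted ((PySem.Str.split? s sign).getD []) (fun t => t) false)

-- ===== PORT A =====
def link (x : List String) (sign : String) : List (List String) :=
  let xs := pvRows x sign
  let l : Int := (PySem.List.pyGetD xs 0 []).length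
  (PySem.List.pyRange 0 (xs.length : Int) 1).foldl (fun r i =>
    (PySem.List.pyRange i (xs.length : Int) 1).foldl (fun r j =>
      if PySem.List.slice (PySem.List.pyGetD xs i []) none (some (l - 1)) =
           PySem.List.slice (PySem.List.pyGetD xs j []) none (some (l - 1)) ∧
         PySem.List.pyGetD (PySem.List.pyGetD xs i []) (l - 1) "" ≠
           PySem.List.pyGetD (PySem.List.pyGetD xs j []) (l - 1) ""
      then r ++ [PySem.List.slice (PySem.List.pyGetD xs i []) none (some (l - 1)) ++
                 PySem.List.sorted [PySem.List.pyGetD (PySem.List.pyGetD xs j []) (l - 1) "",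
                                    PySem.List.pyGetD (PySem.List.pyGetD xs i []) (l - 1) ""]
                   (fun t => t) false]
      else r) r) []

-- ===== PORT B =====
def link_alt (x : List String) (sign : String) : List (List String) :=
  let rows := pvRows x sign
  let l : Int := (PySem.List.pyGetD rows 0 []).length
  let st := rows.foldl
    (fun (st : PySem.Dict (List String) (List String) × List (List String × Int × String)) row =>
      let pre := PySem.List.slice row none (some (l - 1))
      let last := PySem.List.pyGetD row (l - 1) ""
      let g := st.1.getD pre []
      (st.1.insert pre (g ++ [last]), st.2 ++ [(pre, (g.length : Int), last)]))
    (PySem.Dict.empty, [])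
  st.2.foldl (fun r m =>
    (PySem.List.slice (st.1.getD m.1 []) (some (m.2.1 + 1)) none).foldl (fun r other =>
      if other ≠ m.2.2
      then r ++ [m.1 ++ PySem.List.sorted [other, m.2.2] (fun t => t) false]
      else r) r) []

-- ===== PRECONDITION & SPEC =====
-- Pre_link is exactly where Python A returns: x = [] raises IndexError at x[0], sign = ""
-- raises ValueError in split, and a row with fewer tokens than row 0 raises IndexError at
-- x[i][l-1] on the diagonal pair i = j.
def Pre_link (x : List String) (sign : String) : Prop :=
  x ≠ [] ∧ sign ≠ "" ∧
    ∀ s ∈ x, ((PySem.Str.split? (x.headD "") sign).getD []).length ≤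
      ((PySem.Str.split? s sign).getD []).length
instance (x : List String) (sign : String) : Decidable (Pre_link x sign) := by
  unfold Pre_link; infer_instance
def pvWitness_link : List String × String := (["a,b", "a,c"], ",")

def Spec_link (x : List String) (sign : String) (out : List (List String)) : Prop := out = link_alt x sign
instance (x : List String) (sign : String) (out : List (List String)) : Decidable (Spec_link x sign out) := by unfold Spec_link; infer_instance

-- ===== CLAIM (what is proved, stated in full; the proofs are below) =====
def Claim_equal_link : Prop := ∀ (x : List String) (sign : String), Dom_link x sign → Pre_link x sign → Spec_link x sign (link x sign)

-- ===== LEMMAS AND PROOFS =====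

-- abstract prefix / last-token projections (instantiated with slice row [:l-1] / row[l-1])
def pvQ (pre : List String → List String) (lo : List String → String)
    (r r' : List String) : Bool :=
  decide (pre r = pre r') && decide (lo r ≠ lo r')

def pvEmit (pre : List String → List String) (lo : List String → String)
    (r r' : List String) : List String :=
  pre r ++ PySem.List.sorted [lo r', lo r] (fun t => t) false

-- the common value both programs compute, structurally over the row list: each row paired
-- with the later rows that share its prefix but differ in the last token
def pvMid (pre : List String → List String) (lo : List String → String) :
    List (List String) → List (List String)
  | [] => []
  | r :: rest =>
      ((rest.filter (pvQ pre lo r)).map (pvEmit pre lo r)) ++ pvMid pre lo rest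

-- push a filter+map over indices through the index lookup
theorem pvFilterMapThrough {R S : Type} (G : Int → R) (q : R → Bool) (f : R → S)
    (L : List Int) :
    (L.filter (fun j => q (G j))).map (fun j => f (G j)) = ((L.map G).filter q).map f := by
  rw [List.filter_map, List.map_map]; rfl

theorem pvFilterMapThrough' {R S : Type} (G : List String → R) (q : R → Bool) (f : R → S)
    (L : List (List String)) :
    ((L.map G).filter q).map f = (L.filter (fun j => q (G j))).map (fun j => f (G j)) := by
  rw [List.filter_map, List.map_map]; rfl

-- ===== A-side =====
theorem pvA_main (xs : List (List String)) (pre : List String → List String)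
    (lo : List String → String) (a : Nat) :
    (PySem.List.pyRange (a : Int) (xs.length : Int) 1).flatMap
      (fun i => ((PySem.List.pyRange i (xs.length : Int) 1).filter
          (fun j => pvQ pre lo (PySem.List.pyGetD xs i []) (PySem.List.pyGetD xs j []))).map
          (fun j => pvEmit pre lo (PySem.List.pyGetD xs i []) (PySem.List.pyGetD xs j [])))
    = pvMid pre lo (xs.drop a) := by
  induction hn : xs.length - a generalizing a with
  | zero =>
      have h : xs.length ≤ a := by omega
      rw [PySem.List.pyRange_one_eq_nil (by exact_mod_cast h),
        List.drop_eq_nil_of_le h]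
      rfl
  | succ n ih =>
      have ha : a < xs.length := by omega
      rw [PySem.List.pyRange_one_cons (by exact_mod_cast ha)]
      rw [List.flatMap_cons]
      have hcast : ((a : Int) + 1) = ((a + 1 : Nat) : Int) := by push_cast; ring
      rw [hcast, ih (a + 1) (by omega)]
      -- head term
      rw [pvFilterMapThrough (fun j => PySem.List.pyGetD xs j [])]
      have hmap0 : (PySem.List.pyRange ((a : Nat) : Int) (xs.length : Int) 1).map
          (fun j => PySem.List.pyGetD xs j []) = xs.drop a := by
        have := PySem.List.map_pyGetD_pyRange' xs [] (a := ((a : Nat) : Int)) (Int.natCast_nonneg _)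
        simpa using this
      rw [hmap0]
      have hget : PySem.List.pyGetD xs (a : Int) [] = xs[a] := by
        rw [PySem.List.pyGetD_natCast]
        exact List.getD_eq_getElem xs [] ha
      have hdrop : xs.drop a = xs[a] :: xs.drop (a + 1) := List.drop_eq_getElem_cons ha
      rw [hget, hdrop, List.filter_cons]
      have hself : pvQ pre lo xs[a] xs[a] = false := by simp [pvQ]
      rw [hself]
      simp only [Bool.false_eq_true, if_false]
      rw [show xs[a] :: xs.drop (a + 1) = xs.drop a from hdrop.symm, hdrop, pvMid]

-- ===== B-side =====
def pvDStep (pre : List String → List String) (lo : List String → String)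
    (d : PySem.Dict (List String) (List String)) (row : List String) :
    PySem.Dict (List String) (List String) :=
  d.insert (pre row) (d.getD (pre row) [] ++ [lo row])

def pvBStep (pre : List String → List String) (lo : List String → String)
    (st : PySem.Dict (List String) (List String) × List (List String × Int × String))
    (row : List String) :
    PySem.Dict (List String) (List String) × List (List String × Int × String) :=
  (pvDStep pre lo st.1 row,
   st.2 ++ [(pre row, ((st.1.getD (pre row) []).length : Int), lo row)])

def pvMemb (pre : List String → List String) (lo : List String → String) :
    List (List String) → PySem.Dict (List String) (List String) →
    List (List String × Int × String)
  | [], _ => []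
  | r :: rest, d =>
      (pre r, ((d.getD (pre r) []).length : Int), lo r) :: pvMemb pre lo rest (pvDStep pre lo d r)

theorem pvB_fold (pre : List String → List String) (lo : List String → String)
    (rest : List (List String)) (d : PySem.Dict (List String) (List String))
    (m : List (List String × Int × String)) :
    rest.foldl (pvBStep pre lo) (d, m)
      = (rest.foldl (pvDStep pre lo) d, m ++ pvMemb pre lo rest d) := by
  induction rest generalizing d m with
  | nil => simp [pvMemb]
  | cons r rest ih =>
      rw [List.foldl_cons, List.foldl_cons]
      rw [show pvBStep pre lo (d, m) r
            = (pvDStep pre lo d r,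
               m ++ [(pre r, ((d.getD (pre r) []).length : Int), lo r)]) from rfl]
      rw [ih, pvMemb]
      simp

theorem pvB_dict (pre : List String → List String) (lo : List String → String)
    (rest : List (List String)) (d : PySem.Dict (List String) (List String))
    (c : List String) :
    (rest.foldl (pvDStep pre lo) d).getD c []
      = d.getD c [] ++ (rest.filter (fun r => decide (pre r = c))).map lo := by
  induction rest generalizing d with
  | nil => simp
  | cons r rest ih =>
      rw [List.foldl_cons, ih, List.filter_cons]
      by_cases h : pre r = c
      · simp only [h, decide_true, if_true, List.map_cons]
        rw [show pvDStep pre lo d r = d.insert (pre r) (d.getD (pre r) [] ++ [lo r]) from rfl]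
        rw [PySem.Dict.getD_insert, if_pos h.symm, h]
        simp
      · rw [show pvDStep pre lo d r = d.insert (pre r) (d.getD (pre r) [] ++ [lo r]) from rfl]
        rw [PySem.Dict.getD_insert, if_neg (fun hc => h hc.symm)]
        simp [h]

def pvH (pre : List String → List String) (lo : List String → String)
    (rows : List (List String)) (m : List String × Int × String) : List (List String) :=
  ((PySem.List.slice ((rows.foldl (pvDStep pre lo) PySem.Dict.empty).getD m.1 [])
      (some (m.2.1 + 1)) none).filter (fun o => decide (o ≠ m.2.2))).map
    (fun o => m.1 ++ PySem.List.sorted [o, m.2.2] (fun t => t) false)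

theorem pvB_main (pre : List String → List String) (lo : List String → String)
    (rows : List (List String)) (rest done : List (List String))
    (hsplit : done ++ rest = rows) :
    (pvMemb pre lo rest (done.foldl (pvDStep pre lo) PySem.Dict.empty)).flatMap
        (pvH pre lo rows)
      = pvMid pre lo rest := by
  induction rest generalizing done with
  | nil => rfl
  | cons r rest ih =>
      rw [pvMemb, List.flatMap_cons]
      have hrec : (pvMemb pre lo rest ((done ++ [r]).foldl (pvDStep pre lo) PySem.Dict.empty)).flatMap
          (pvH pre lo rows) = pvMid pre lo rest := by
        apply ih; rw [← hsplit]; simp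
      rw [List.foldl_append] at hrec
      simp only [List.foldl_cons, List.foldl_nil] at hrec
      rw [hrec, pvMid]
      congr 1
      -- head member
      set pos : Nat := (((done.foldl (pvDStep pre lo) PySem.Dict.empty).getD (pre r) []).length) with hposdef
      have hpos : ((done.foldl (pvDStep pre lo) PySem.Dict.empty).getD (pre r) [])
          = (done.filter (fun r' => decide (pre r' = pre r))).map lo := by
        rw [pvB_dict]; simp
      have hfull : ((rows.foldl (pvDStep pre lo) PySem.Dict.empty).getD (pre r) [])
          = ((done.filter (fun r' => decide (pre r' = pre r))).map lo ++ [lo r])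
            ++ (rest.filter (fun r' => decide (pre r' = pre r))).map lo := by
        rw [← hsplit, pvB_dict]
        simp [List.filter_append]
      show pvH pre lo rows (pre r, (pos : Int), lo r) = _
      rw [pvH]
      simp only [hfull]
      have hslice : PySem.List.slice
          (((done.filter (fun r' => decide (pre r' = pre r))).map lo ++ [lo r])
            ++ (rest.filter (fun r' => decide (pre r' = pre r))).map lo)
          (some ((pos : Int) + 1)) none
          = (rest.filter (fun r' => decide (pre r' = pre r))).map lo := by
        rw [PySem.List.slice_from _ (by positivity)]
        have hlen : ((done.filter (fun r' => decide (pre r' = pre r))).map lo ++ [lo r]).length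
            = pos + 1 := by
          simp [hposdef, hpos]
        rw [show (((pos : Int) + 1)).toNat = pos + 1 by omega, ← hlen, List.drop_left]
      rw [hslice]
      rw [pvFilterMapThrough' lo (fun o => decide (o ≠ lo r))
        (fun o => pre r ++ PySem.List.sorted [o, lo r] (fun t => t) false)]
      rw [List.filter_filter]
      have hbr : ∀ r' : List String,
          (decide (lo r' ≠ lo r) && decide (pre r' = pre r)) = pvQ pre lo r r' := by
        intro r'
        simp only [pvQ, Bool.and_comm]
        congr 1
        · exact decide_eq_decide.mpr eq_comm
        · exact decide_eq_decide.mpr ne_comm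
      simp only [hbr]
      rfl

theorem pvLink_eq_mid (x : List String) (sign : String) :
    link x sign
      = pvMid (fun row => PySem.List.slice row none (some ((PySem.List.pyGetD (pvRows x sign) 0 []).length - 1)))
          (fun row => PySem.List.pyGetD row ((PySem.List.pyGetD (pvRows x sign) 0 []).length - 1) "")
          (pvRows x sign) := by
  unfold link
  simp only [PySem.List.foldl_append_ite, PySem.List.foldl_append_eq_flatMap, List.nil_append]
  have := pvA_main (pvRows x sign)
    (fun row => PySem.List.slice row none (some ((PySem.List.pyGetD (pvRows x sign) 0 []).length - 1)))
    (fun row => PySem.List.pyGetD row ((PySem.List.pyGetD (pvRows x sign) 0 []).length - 1) "") 0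
  simp only [Nat.cast_zero, List.drop_zero] at this
  rw [← this]
  apply List.flatMap_congr
  intro i _
  simp [pvQ, pvEmit]

theorem pvLinkAlt_eq_mid (x : List String) (sign : String) :
    link_alt x sign
      = pvMid (fun row => PySem.List.slice row none (some ((PySem.List.pyGetD (pvRows x sign) 0 []).length - 1)))
          (fun row => PySem.List.pyGetD row ((PySem.List.pyGetD (pvRows x sign) 0 []).length - 1) "")
          (pvRows x sign) := by
  show (((pvRows x sign).foldl
      (pvBStep (fun row => PySem.List.slice row none (some ((PySem.List.pyGetD (pvRows x sign) 0 []).length - 1)))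
        (fun row => PySem.List.pyGetD row ((PySem.List.pyGetD (pvRows x sign) 0 []).length - 1) ""))
      (PySem.Dict.empty, [])).2.foldl
      (fun r m => (PySem.List.slice
          ((((pvRows x sign).foldl
            (pvBStep (fun row => PySem.List.slice row none (some ((PySem.List.pyGetD (pvRows x sign) 0 []).length - 1)))
              (fun row => PySem.List.pyGetD row ((PySem.List.pyGetD (pvRows x sign) 0 []).length - 1) ""))
            (PySem.Dict.empty, [])).1.getD m.1 []))
          (some (m.2.1 + 1)) none).foldl
        (fun r other => if other ≠ m.2.2
          then r ++ [m.1 ++ PySem.List.sorted [other, m.2.2] (fun t => t) false]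
          else r) r) [])
    = _
  rw [pvB_fold]
  simp only [PySem.List.foldl_append_ite, PySem.List.foldl_append_eq_flatMap, List.nil_append]
  exact pvB_main _ _ (pvRows x sign) (pvRows x sign) [] rfl

-- ===== VERDICT (by name: the statement is the Claim_ definition above) =====
theorem link_spec : Claim_equal_link := by
  intro x sign _ _
  unfold Spec_link
  rw [pvLink_eq_mid, pvLinkAlt_eq_mid]
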